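-- pv_equiv track=rewrite | github.com/littlezhe001/cumt-2023-crypto | hill.py | cal_mul
-- ===== SOURCE A (Python) =====
-- def cal_mul(key, text):
--     temp = 0
--     res = []
--     for i in range(len(text)):
--         for j in range(len(text)):
--             temp += text[j]*key[j][i]
--         temp = temp % 26
--         res.append(temp)
--         temp = 0
--     return res
-- ===== SOURCE B (Python) =====
-- def cal_mul(key, text):
--     res = [0] * len(text)
--     for t, row in zip(text, key):
--         res = [r + t * x for r, x in zip(res, row)]
--     return [x % 26 for x in res]
-- ===== Notes on version B (the rewrite author's own statement) =====
-- stated objective: idiomatic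
-- what changed: Replaces the index-based per-output inner scan by a row-major zip accumulation: a whole result vector is updated additively once per text element, with a single mod-26 pass at the end; no explicit indexing at all.
import Mathlib
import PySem

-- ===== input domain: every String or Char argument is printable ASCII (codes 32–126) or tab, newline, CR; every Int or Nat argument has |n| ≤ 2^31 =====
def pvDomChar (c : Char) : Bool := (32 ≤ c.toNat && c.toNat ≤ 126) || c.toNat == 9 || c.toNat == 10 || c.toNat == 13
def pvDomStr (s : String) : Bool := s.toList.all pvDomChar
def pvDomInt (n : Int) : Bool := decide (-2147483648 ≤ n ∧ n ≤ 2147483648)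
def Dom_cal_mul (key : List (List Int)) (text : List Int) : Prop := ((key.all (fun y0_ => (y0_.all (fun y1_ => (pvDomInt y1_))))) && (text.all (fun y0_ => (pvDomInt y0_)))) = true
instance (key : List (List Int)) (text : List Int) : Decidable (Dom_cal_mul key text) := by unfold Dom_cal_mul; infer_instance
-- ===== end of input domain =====

-- B replaces A's index-based per-output inner scan by a row-major zip accumulation over a
-- whole result vector, with one mod-26 pass at the end (idiomatic; same O(n^2) cost).

-- ===== PORT A =====
-- literal port of A: outer loop over output index i, inner loop summing text[j]*key[j][i],
-- one mod 26 and append per i (pyGetD defaults are never reached under Pre_).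
def cal_mul (key : List (List Int)) (text : List Int) : List Int :=
  (PySem.List.pyRange 0 text.length 1).foldl
    (fun res i =>
      let temp :=
        (PySem.List.pyRange 0 text.length 1).foldl
          (fun temp j =>
            temp + PySem.List.pyGetD text j 0 *
              PySem.List.pyGetD (PySem.List.pyGetD key j []) i 0) 0
      res ++ [PySem.Int.mod temp 26]) []

-- ===== PORT B =====
-- literal port of Source B: res = [0]*n; for t, row in zip(text, key): res = [r + t*x for r, x in zip(res, row)];
-- return [x % 26 for x in res]
def cal_mul_alt (key : List (List Int)) (text : List Int) : List Int :=
  ((text.zip key).foldl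
      (fun res tk => (res.zip tk.2).map (fun q => q.1 + tk.1 * q.2))
      (List.replicate text.length 0)).map
    (fun x => PySem.Int.mod x 26)

-- ===== PRECONDITION & SPEC =====
-- Pre_ excludes exactly the inputs where A raises IndexError: key must have at least
-- len(text) rows and each of those rows at least len(text) entries.
def Pre_cal_mul (key : List (List Int)) (text : List Int) : Prop :=
  text.length ≤ key.length ∧ ∀ row ∈ key.take text.length, text.length ≤ row.length
instance (key : List (List Int)) (text : List Int) : Decidable (Pre_cal_mul key text) := by
  unfold Pre_cal_mul; infer_instance

def pvWitness_cal_mul : List (List Int) × List Int := ([[1, 2], [3, 4]], [5, 6])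

def Spec_cal_mul (key : List (List Int)) (text : List Int) (out : List Int) : Prop := out = cal_mul_alt key text
instance (key : List (List Int)) (text : List Int) (out : List Int) : Decidable (Spec_cal_mul key text out) := by unfold Spec_cal_mul; infer_instance

-- ===== CLAIM (what is proved, stated in full; the proofs are below) =====
def Claim_equal_cal_mul : Prop := ∀ (key : List (List Int)) (text : List Int), Dom_cal_mul key text → Pre_cal_mul key text → Spec_cal_mul key text (cal_mul key text)

-- ===== LEMMAS AND PROOFS =====

-- A's result in closed form: one mod-26 sum per output index.
theorem cal_mul_closed (key : List (List Int)) (text : List Int) :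
    cal_mul key text =
      (List.range text.length).map (fun i =>
        PySem.Int.mod
          (((List.range text.length).map
              (fun j => text.getD j 0 * (key.getD j []).getD i 0)).sum) 26) := by
  unfold cal_mul
  rw [PySem.List.pyRange_zero_nat, List.foldl_map, PySem.List.foldl_append_singleton_eq_map]
  refine List.map_congr_left (fun i _ => ?_)
  congr 1
  rw [List.foldl_map, PySem.List.foldl_add]
  simp [PySem.List.pyGetD_natCast]

-- B's accumulation loop in closed form (rows at least n long, res exactly n long).
theorem bfold_closed (n : Nat) :
    ∀ (ps : List (Int × List Int)) (res : List Int), res.length = n →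
      (∀ p ∈ ps, n ≤ p.2.length) →
      ps.foldl (fun res tk => (res.zip tk.2).map (fun q => q.1 + tk.1 * q.2)) res
        = (List.range n).map (fun i =>
            res.getD i 0 + (ps.map (fun p => p.1 * (p.2.getD i 0))).sum) := by
  intro ps
  induction ps with
  | nil =>
      intro res hlen _
      simp only [List.foldl_nil, List.map_nil, List.sum_nil, add_zero]
      apply List.ext_getElem
      · simp [hlen]
      · intro k h1 h2
        simp [List.getD_eq_getElem?_getD, List.getElem?_eq_getElem h1]
  | cons p ps ih =>
      intro res hlen hrows
      simp only [List.foldl_cons]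
      have hlen' : ((res.zip p.2).map (fun q => q.1 + p.1 * q.2)).length = n := by
        have := hrows p (by simp)
        simp [hlen]; omega
      rw [ih _ hlen' (fun q hq => hrows q (by simp [hq]))]
      refine List.map_congr_left (fun i hi => ?_)
      have hin : i < n := List.mem_range.mp hi
      have hres : i < res.length := by omega
      have hrow : i < p.2.length := lt_of_lt_of_le hin (hrows p (by simp))
      have hzip : i < ((res.zip p.2).map (fun q => q.1 + p.1 * q.2)).length := by omega
      rw [List.getD_eq_getElem _ _ hzip, List.getD_eq_getElem _ _ hres]
      simp only [List.map_cons, List.sum_cons, List.getElem_map, List.getElem_zip]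
      rw [List.getD_eq_getElem _ _ hrow]
      ring

-- under Pre_, the zipped (text, key) rows all have length ≥ n
theorem rows_long (key : List (List Int)) (text : List Int)
    (h : Pre_cal_mul key text) :
    ∀ p ∈ text.zip key, text.length ≤ p.2.length := by
  intro p hp
  obtain ⟨k, hk, hget⟩ := List.mem_iff_getElem.mp hp
  have hkm : k < min text.length key.length := by simpa [List.length_zip] using hk
  have hk2 : k < key.length := by omega
  have hkn : k < text.length := by omega
  have : p.2 = key[k] := by rw [← hget]; simp [List.getElem_zip]
  rw [this]
  exact h.2 key[k] (List.mem_take_iff_getElem.mpr ⟨k, by have := h.1; omega, rfl⟩)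

-- the per-row sum over the zipped list equals the index-based sum
theorem zip_sum_eq (key : List (List Int)) (text : List Int)
    (h : Pre_cal_mul key text) (i : Nat) :
    ((text.zip key).map (fun p => p.1 * (p.2.getD i 0))).sum
      = ((List.range text.length).map
          (fun j => text.getD j 0 * (key.getD j []).getD i 0)).sum := by
  congr 1
  apply List.ext_getElem
  · have := h.1; simp; omega
  · intro k h1 h2
    have hkt : k < text.length := by simp at h1; omega
    have hkk : k < key.length := by simp at h1; omega
    simp [List.getElem_zip, hkt, hkk]

-- ===== VERDICT (by name: the statement is the Claim_ definition above) =====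
theorem cal_mul_spec : Claim_equal_cal_mul := by
  intro key text _ hpre
  unfold Spec_cal_mul cal_mul_alt
  rw [cal_mul_closed,
      bfold_closed text.length (text.zip key) _ (by simp) (rows_long key text hpre),
      List.map_map]
  refine List.map_congr_left (fun i hi => ?_)
  have hin : i < text.length := List.mem_range.mp hi
  simp only [Function.comp]
  rw [zip_sum_eq key text hpre i]
  congr 1
  rw [List.getD_eq_getElem _ _ (by simp [hin])]
  simp
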